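-- pv_equiv track=rewrite | github.com/Narges1989/PythonProjects | src/py103/guide18.py | guide18
-- ===== SOURCE A (Python) =====
-- def guide18(a: int, b: int) -> int:
--     multi = 1
--     if a<b:
--         for number in range(a,b+1):
--             if number%5 == 0:
--                 multi = multi * number
--         return multi
--     elif a>b:
--         return -1
--     else:
--         return 1
-- ===== SOURCE B (Python) =====
-- def guide18(a: int, b: int) -> int:
--     if a > b:
--         return -1
--     if a == b:
--         return 1
--     # multiples of 5 in [a, b] are 5*k for k in [k1, k2]
--     k1 = -((-a) // 5)   # ceil(a / 5)
--     k2 = b // 5         # floor(b / 5)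
--     n = k2 - k1 + 1
--     if n <= 0:
--         return 1
--     p = 1
--     for k in range(k1, k2 + 1):
--         p *= k
--     return 5 ** n * p
-- ===== Notes on version B (the rewrite author's own statement) =====
-- stated objective: alternative
-- what changed: Instead of scanning every integer in [a,b] and testing %5, B computes the index range [ceil(a/5), floor(b/5)] of the multiples in closed form and multiplies only those indices times one power of 5.
import Mathlib
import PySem

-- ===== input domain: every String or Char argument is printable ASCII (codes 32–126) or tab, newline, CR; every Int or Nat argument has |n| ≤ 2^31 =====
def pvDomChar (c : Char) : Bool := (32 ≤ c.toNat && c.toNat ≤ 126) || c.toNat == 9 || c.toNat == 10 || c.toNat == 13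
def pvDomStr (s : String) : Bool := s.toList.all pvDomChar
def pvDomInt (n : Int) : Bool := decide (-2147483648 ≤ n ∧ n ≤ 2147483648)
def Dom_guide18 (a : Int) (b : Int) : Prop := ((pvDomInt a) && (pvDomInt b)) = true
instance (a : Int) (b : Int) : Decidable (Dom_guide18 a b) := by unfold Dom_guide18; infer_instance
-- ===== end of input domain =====

-- B replaces A's scan of every integer in [a,b] by a closed-form index range: the multiples of
-- 5 are 5*k for k in [ceil(a/5), floor(b/5)], so it multiplies those k and one power of 5.

-- ===== PORT A =====
def guide18 (a : Int) (b : Int) : Int :=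
  if a < b then
    (PySem.List.pyRange a (b+1) 1).foldl
      (fun multi number => if PySem.Int.mod number 5 == 0 then multi * number else multi) 1
  else if a > b then -1
  else 1

-- ===== PORT B =====
def guide18_alt (a : Int) (b : Int) : Int :=
  if a > b then -1
  else if a = b then 1
  else
    let k1 := -(PySem.Int.floordiv (-a) 5)
    let k2 := PySem.Int.floordiv b 5
    let n := k2 - k1 + 1
    if n ≤ 0 then 1
    else 5 ^ n.toNat * (PySem.List.pyRange k1 (k2+1) 1).foldl (fun p k => p * k) 1

-- ===== PRECONDITION & SPEC =====
def Spec_guide18 (a : Int) (b : Int) (out : Int) : Prop := out = guide18_alt a b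
instance (a : Int) (b : Int) (out : Int) : Decidable (Spec_guide18 a b out) := by unfold Spec_guide18; infer_instance

-- ===== CLAIM (what is proved, stated in full; the proofs are below) =====
def Claim_equal_guide18 : Prop := ∀ (a : Int) (b : Int), Dom_guide18 a b → Spec_guide18 a b (guide18 a b)

-- ===== LEMMAS AND PROOFS =====

def prodR (k1 k2 : Int) : Int := (PySem.List.pyRange k1 (k2+1) 1).foldl (fun p k => p * k) 1

def Gval (k1 k2 : Int) : Int :=
  if k2 - k1 + 1 ≤ 0 then 1 else 5 ^ (k2 - k1 + 1).toNat * prodR k1 k2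

lemma foldl_mul_acc (l : List Int) (acc : Int) :
    l.foldl (fun p k => p * k) acc = acc * l.foldl (fun p k => p * k) 1 := by
  induction l generalizing acc with
  | nil => simp
  | cons x l ih =>
    simp only [List.foldl_cons]
    rw [ih (acc * x), ih (1 * x)]
    ring

lemma prodR_cons (k1 k2 : Int) (h : k1 ≤ k2) :
    prodR k1 k2 = k1 * prodR (k1 + 1) k2 := by
  unfold prodR
  rw [PySem.List.pyRange_one_cons (by omega : k1 < k2 + 1)]
  simp only [List.foldl_cons]
  rw [foldl_mul_acc]
  ring

lemma fd5 (x : Int) : PySem.Int.floordiv x 5 = x / 5 :=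
  PySem.Int.floordiv_eq_ediv_of_pos (by norm_num)

lemma Gval_step (k1 k2 : Int) (h : k1 ≤ k2) : Gval k1 k2 = 5 * k1 * Gval (k1 + 1) k2 := by
  unfold Gval
  rw [if_neg (by omega), prodR_cons _ _ h]
  by_cases hk : k1 = k2
  · subst hk
    rw [if_pos (by omega)]
    have h0 : prodR (k1 + 1) k1 = 1 := by
      unfold prodR
      rw [PySem.List.pyRange_one_eq_nil (by omega)]
      rfl
    have h1 : (k1 - k1 + 1).toNat = 1 := by omega
    rw [h0, h1]
    ring
  · rw [if_neg (by omega)]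
    have hp : (k2 - k1 + 1).toNat = (k2 - (k1 + 1) + 1).toNat + 1 := by omega
    rw [hp, pow_succ]
    ring

lemma loopA (m : Nat) : ∀ (a acc b : Int), b + 1 = a + m →
    (PySem.List.pyRange a (b+1) 1).foldl
      (fun multi number => if PySem.Int.mod number 5 == 0 then multi * number else multi) acc
    = acc * Gval (-(PySem.Int.floordiv (-a) 5)) (PySem.Int.floordiv b 5) := by
  induction m with
  | zero =>
    intro a acc b h
    rw [PySem.List.pyRange_one_eq_nil (by omega : b + 1 ≤ a)]
    simp only [List.foldl_nil, Gval, fd5]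
    rw [if_pos (by omega)]
    ring
  | succ m ih =>
    intro a acc b h
    rw [PySem.List.pyRange_one_cons (by omega : a < b + 1)]
    simp only [List.foldl_cons]
    rw [ih (a+1) _ b (by omega)]
    rw [PySem.Int.mod_eq_emod_of_pos (by norm_num : (0:Int) < 5)]
    simp only [fd5]
    by_cases h5 : a % 5 = 0
    · rw [if_pos (by simpa using h5)]
      have hk1 : -(-a / 5) = a / 5 := by omega
      have hk1' : -(-(a+1) / 5) = a / 5 + 1 := by omega
      have hle : a / 5 ≤ b / 5 := by omega
      rw [hk1, hk1', Gval_step _ _ hle]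
      have ha : a = 5 * (a / 5) := by omega
      rw [← ha]
      ring
    · rw [if_neg (by simpa using h5)]
      have : -(-(a+1) / 5) = -(-a / 5) := by omega
      rw [this]

-- ===== VERDICT (by name: the statement is the Claim_ definition above) =====
theorem guide18_spec : Claim_equal_guide18 := by
  intro a b _
  unfold Spec_guide18 guide18 guide18_alt
  rcases lt_trichotomy a b with hlt | heq | hgt
  · rw [if_pos hlt, if_neg (by omega), if_neg (by omega)]
    rw [loopA (b + 1 - a).toNat a 1 b (by omega)]
    simp only [Gval, prodR, one_mul]
  · subst heq
    rw [if_neg (lt_irrefl a), if_pos rfl]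
  · rw [if_neg (by omega), if_pos hgt, if_pos hgt]
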